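-- pv_equiv track=rewrite | github.com/roheet02/LeetCodeSolutionByRoheet | codes/dynamic_programming/no_of_smooth_decents_periods_stocks.py | getDecentPeriods
-- ===== SOURCE A (Python) =====
-- def getDecentPeriods(prices):
--     count=0
--     temp=0
--     for i in range(len(prices)):
--         if i>0 and prices[i]==prices[i-1]-1:
--             temp+=1    #here we are getting sequence of decent
--         else:
--             temp=1
--         count+=temp
--     return count
-- ===== SOURCE B (Python) =====
-- def getDecentPeriods(prices):
--     total = 0
--     run = 0
--     prev = None
--     for x in prices:
--         if prev is not None and x == prev - 1:
--             run += 1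
--         else:
--             total += run * (run + 1) // 2
--             run = 1
--         prev = x
--     return total + run * (run + 1) // 2
-- ===== Notes on version B (the rewrite author's own statement) =====
-- stated objective: alternative
-- what changed: Instead of adding the running streak length at every index, B scans the values once (no index arithmetic), detects maximal descent runs via the previous element, and adds each completed run's contribution with the triangular closed form L*(L+1)//2.
import Mathlib
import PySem

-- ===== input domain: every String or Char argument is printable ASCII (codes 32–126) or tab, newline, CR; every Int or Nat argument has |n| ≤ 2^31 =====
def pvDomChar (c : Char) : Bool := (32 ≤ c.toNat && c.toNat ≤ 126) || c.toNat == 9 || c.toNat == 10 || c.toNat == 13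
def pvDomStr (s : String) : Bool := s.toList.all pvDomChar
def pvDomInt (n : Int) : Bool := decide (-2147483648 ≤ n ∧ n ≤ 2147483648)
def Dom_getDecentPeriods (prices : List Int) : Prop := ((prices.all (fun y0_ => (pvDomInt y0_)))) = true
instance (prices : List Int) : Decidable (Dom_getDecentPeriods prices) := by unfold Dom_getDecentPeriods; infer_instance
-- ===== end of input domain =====

-- B replaces A's per-index summing of the running streak length by a single value scan that
-- adds each completed run's triangular number L*(L+1)//2; same cost, different decomposition.

-- ===== PORT A =====
def getDecentPeriods (prices : List Int) : Int :=
  ((PySem.List.pyRange 0 (prices.length : Int) 1).foldl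
    (fun (st : Int × Int) i =>
      let temp : Int :=
        if i > 0 ∧ PySem.List.pyGetD prices i 0 = PySem.List.pyGetD prices (i - 1) 0 - 1
        then st.2 + 1 else 1
      (st.1 + temp, temp)) (0, 0)).1

-- ===== PORT B =====
def altLoop : Int → Int → Option Int → List Int → Int
  | total, run, _, [] => total + PySem.Int.floordiv (run * (run + 1)) 2
  | total, run, prev, x :: xs =>
    if (match prev with | some p => x == p - 1 | none => false) then
      altLoop total (run + 1) (some x) xs
    else
      altLoop (total + PySem.Int.floordiv (run * (run + 1)) 2) 1 (some x) xs

def getDecentPeriods_alt (prices : List Int) : Int :=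
  altLoop 0 0 none prices

-- ===== PRECONDITION & SPEC =====
def Spec_getDecentPeriods (prices : List Int) (out : Int) : Prop := out = getDecentPeriods_alt prices
instance (prices : List Int) (out : Int) : Decidable (Spec_getDecentPeriods prices out) := by unfold Spec_getDecentPeriods; infer_instance

-- ===== CLAIM (what is proved, stated in full; the proofs are below) =====
def Claim_equal_getDecentPeriods : Prop := ∀ (prices : List Int), Dom_getDecentPeriods prices → Spec_getDecentPeriods prices (getDecentPeriods prices)

-- ===== LEMMAS AND PROOFS =====

-- A's loop body as a named function (definitionally equal to the lambda in the port)
def stepA (p : List Int) (st : Int × Int) (i : Int) : Int × Int :=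
  let temp : Int :=
    if i > 0 ∧ PySem.List.pyGetD p i 0 = PySem.List.pyGetD p (i - 1) 0 - 1
    then st.2 + 1 else 1
  (st.1 + temp, temp)

-- A's loop, restated as a structural recursion carrying the previous element.
def loopA : Int → Int → Option Int → List Int → Int
  | c, _, _, [] => c
  | c, t, prev, x :: xs =>
    let t' : Int := if (match prev with | some p => x == p - 1 | none => false) then t + 1 else 1
    loopA (c + t') t' (some x) xs

theorem pyGetD_append_len (l r : List Int) (x d : Int) :
    PySem.List.pyGetD (l ++ x :: r) (l.length : Int) d = x := by
  rw [PySem.List.pyGetD_natCast]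
  simp [List.getD]

theorem stepA_eval (done : List Int) (x : Int) (xs : List Int) (c t : Int) :
    stepA (done ++ x :: xs) (c, t) (done.length : Int)
      = if (match done.getLast? with | some p => x == p - 1 | none => false) = true
        then (c + (t + 1), t + 1) else (c + 1, 1) := by
  rcases done.eq_nil_or_concat with h | ⟨d, q, h⟩ <;> subst h
  · simp [stepA]
  · simp only [List.concat_eq_append]
    have hg : PySem.List.pyGetD ((d ++ [q]) ++ x :: xs) (((d ++ [q]).length : Int)) 0 = x :=
      pyGetD_append_len (d ++ [q]) xs x 0
    have hp : PySem.List.pyGetD ((d ++ [q]) ++ x :: xs) (((d ++ [q]).length : Int) - 1) 0 = q := by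
      have e : ((d ++ [q]).length : Int) - 1 = (d.length : Int) := by
        push_cast [List.length_append, List.length_cons, List.length_nil]
        ring
      rw [e, show (d ++ [q]) ++ x :: xs = d ++ q :: x :: xs by simp]
      exact pyGetD_append_len d (x :: xs) q 0
    have hl : (d ++ [q]).getLast? = some q := by simp
    have hpos : (((d ++ [q]).length : Int)) > 0 := by
      push_cast [List.length_append, List.length_cons, List.length_nil]
      omega
    simp only [stepA, hl]
    rw [hg, hp]
    by_cases hxq : x = q - 1
    · rw [if_pos ⟨hpos, hxq⟩, if_pos (by simpa using hxq)]
    · rw [if_neg (fun h => hxq h.2), if_neg (by simpa using hxq)]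

theorem foldA_key (rest : List Int) : ∀ (done : List Int) (c t : Int),
    ((PySem.List.pyRange (done.length : Int) (((done ++ rest).length : Int)) 1).foldl
      (stepA (done ++ rest)) (c, t)).1
    = loopA c t done.getLast? rest := by
  induction rest with
  | nil =>
    intro done c t
    rw [PySem.List.pyRange_one_eq_nil (by simp)]
    simp [loopA]
  | cons x xs ih =>
    intro done c t
    have hab : (done.length : Int) < ((done ++ x :: xs).length : Int) := by
      push_cast [List.length_append, List.length_cons, List.length_nil]
      omega
    rw [PySem.List.pyRange_one_cons hab, List.foldl_cons, stepA_eval]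
    simp only [loopA]
    have e2 : done ++ x :: xs = (done ++ [x]) ++ xs := by simp
    have e1 : ((done ++ [x]).length : Int) = (done.length : Int) + 1 := by
      push_cast [List.length_append, List.length_cons, List.length_nil]
      ring
    by_cases hb : (match done.getLast? with | some p => x == p - 1 | none => false) = true
    · rw [if_pos hb, if_pos hb, e2, ← e1]
      have ihx := ih (done ++ [x]) (c + (t + 1)) (t + 1)
      rw [show (done ++ [x]).getLast? = some x from by simp] at ihx
      exact ihx
    · rw [if_neg hb, if_neg hb, e2, ← e1]
      have ihx := ih (done ++ [x]) (c + 1) 1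
      rw [show (done ++ [x]).getLast? = some x from by simp] at ihx
      exact ihx

-- triangular step: tri (t+1) = tri t + (t+1), exact for floor division by 2
theorem tri_succ (t : Int) :
    PySem.Int.floordiv ((t + 1) * (t + 1 + 1)) 2 = PySem.Int.floordiv (t * (t + 1)) 2 + (t + 1) := by
  rw [PySem.Int.floordiv_eq_ediv_of_pos (by omega), PySem.Int.floordiv_eq_ediv_of_pos (by omega)]
  have h : (t + 1) * (t + 1 + 1) = t * (t + 1) + (t + 1) * 2 := by ring
  rw [h, Int.add_mul_ediv_right _ _ (by omega : (2:Int) ≠ 0)]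

theorem loopA_eq_altLoop (xs : List Int) : ∀ (total t : Int) (prev : Option Int),
    loopA (total + PySem.Int.floordiv (t * (t + 1)) 2) t prev xs = altLoop total t prev xs := by
  induction xs with
  | nil => intro total t prev; simp [loopA, altLoop]
  | cons x xs ih =>
    intro total t prev
    simp only [loopA, altLoop]
    by_cases hc : (match prev with | some p => x == p - 1 | none => false) = true
    · rw [if_pos hc, if_pos hc, ← ih total (t + 1) (some x)]
      congr 1
      rw [tri_succ]
      ring
    · rw [if_neg hc, if_neg hc, ← ih (total + PySem.Int.floordiv (t * (t + 1)) 2) 1 (some x)]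
      have h1 : PySem.Int.floordiv ((1:Int) * (1 + 1)) 2 = 1 := by decide
      rw [h1]

-- ===== VERDICT (by name: the statement is the Claim_ definition above) =====
theorem getDecentPeriods_spec : Claim_equal_getDecentPeriods := by
  intro prices _
  unfold Spec_getDecentPeriods getDecentPeriods getDecentPeriods_alt
  have h := foldA_key prices [] 0 0
  simp only [List.nil_append, List.length_nil, Nat.cast_zero, List.getLast?_nil] at h
  have h2 : loopA 0 0 none prices = altLoop 0 0 none prices := by
    have h3 := loopA_eq_altLoop prices 0 0 none
    have h0 : (0:Int) + PySem.Int.floordiv (0 * (0 + 1)) 2 = 0 := by decide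
    rw [h0] at h3
    exact h3
  exact h.trans h2
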